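-- pv_equiv track=rewrite | github.com/Venhoff-cpu/Python_exercises | Other/string_split.py | solution
-- ===== SOURCE A (Python) =====
-- def solution(S):
--     string_len = len(S)
--     groups = []
--     num_of_splits = 3
--
--     def gen_partitions(i):
--         if i >= string_len:
--             yield list(map(tuple, groups))
--         else:
--             if string_len - i > num_of_splits - len(groups):
--                 for group in groups:
--                     group.append(S[i])
--                     yield from gen_partitions(i + 1)
--                     group.pop()
--
--             if len(groups) < num_of_splits:
--                 groups.append([S[i]])
--                 yield from gen_partitions(i + 1)
--                 groups.pop()
--
--     result = gen_partitions(0)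
--
--     result = [sorted(ps, key=lambda p: (len(p), p)) for ps in result]
--
--     return result
-- ===== SOURCE B (Python) =====
-- def solution(S):
--     n = len(S)
--     k = min(3, n)
--     out = []
--     for code in range(3 ** n):
--         # base-3 digits of code, most significant first: one group label per character
--         digits = []
--         c = code
--         for _ in range(n):
--             digits.append(c % 3)
--             c //= 3
--         digits.reverse()
--         # keep restricted-growth labelings that use exactly k groups
--         mx = -1
--         ok = True
--         for d in digits:
--             if d > mx + 1:
--                 ok = False
--                 break
--             if d > mx:
--                 mx = d
--         if not ok or mx + 1 != k:
--             continue
--         groups = [[] for _ in range(k)]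
--         for ch, d in zip(S, digits):
--             groups[d].append(ch)
--         part = [tuple(g) for g in groups]
--         part.sort(key=lambda p: (len(p), p))
--         out.append(part)
--     return out
-- ===== Notes on version B (the rewrite author's own statement) =====
-- stated objective: alternative
-- what changed: Replaces the recursive backtracking generator over mutable group lists with a non-recursive brute-force enumeration: iterate over all base-3 codes 0..3^n-1, decode each into a group-label string, keep exactly the restricted-growth labelings using min(3,n) groups, and materialize each kept labeling into groups in one zip pass.
import Mathlib
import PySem

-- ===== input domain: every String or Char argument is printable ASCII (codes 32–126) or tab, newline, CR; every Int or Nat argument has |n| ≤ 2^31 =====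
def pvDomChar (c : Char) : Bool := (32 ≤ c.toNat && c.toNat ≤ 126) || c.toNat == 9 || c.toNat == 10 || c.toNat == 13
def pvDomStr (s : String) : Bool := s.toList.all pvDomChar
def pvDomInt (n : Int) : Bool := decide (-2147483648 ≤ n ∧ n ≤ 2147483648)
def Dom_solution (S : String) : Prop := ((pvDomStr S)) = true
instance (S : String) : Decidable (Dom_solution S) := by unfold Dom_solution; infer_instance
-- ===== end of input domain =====

-- B enumerates all base-3 labelings and filters, instead of A's recursive pruned backtracking ('alternative', not faster).

-- ===== PORT A =====
-- A's recursive generator gen_partitions: recursion on m = string_len - i; the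
-- mutable append/yield/pop backtracking is transliterated as passing the updated
-- groups list to the recursive call (append+pop restores the state exactly).
def genA (cs : List String) : Nat → Nat → List (List String) → List (List (List String))
  | 0, _, groups => [groups]
  | m+1, i, groups =>
      (if (3 : Int) - groups.length < (m : Int) + 1 then
        (List.range groups.length).flatMap (fun j =>
          genA cs m (i+1) (groups.modify j (· ++ [cs.getD i ""])))
      else []) ++
      (if groups.length < 3 then genA cs m (i+1) (groups ++ [[cs.getD i ""]]) else [])

def solution (S : String) : List (List (List String)) :=
  let cs := S.toList.map (fun c => String.ofList [c])
  let res := genA cs cs.length 0 []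
  res.map (fun ps => PySem.List.sorted2 ps (fun p => (p.length : Int)) (fun p => p) false)

-- ===== PORT B =====
-- least-significant-first base-3 digits loop of Source B (n iterations of %3, //3)
def lsbB : Nat → Nat → List Nat
  | 0, _ => []
  | m+1, c => c % 3 :: lsbB m (c / 3)

def digitsB (n : Nat) (code : Nat) : List Nat := (lsbB n code).reverse

-- Source B's validity loop: running maximum mx (starts at -1), break on d > mx+1
def okLoopB : List Nat → Int → Bool × Int
  | [], mx => (true, mx)
  | d :: ds, mx =>
      if (d : Int) > mx + 1 then (false, mx)
      else okLoopB ds (if (d : Int) > mx then (d : Int) else mx)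

def solution_alt (S : String) : List (List (List String)) :=
  let cs := S.toList.map (fun c => String.ofList [c])
  let n := cs.length
  let k := min 3 n
  (List.range (3 ^ n)).foldl (fun out code =>
    let digits := digitsB n code
    let r := okLoopB digits (-1)
    if r.1 && (r.2 + 1 == (k : Int)) then
      let groups := (cs.zip digits).foldl
        (fun gs p => gs.modify p.2 (· ++ [p.1])) (List.replicate k ([] : List String))
      out ++ [PySem.List.sorted2 groups (fun p => (p.length : Int)) (fun p => p) false]
    else out) []

-- ===== PRECONDITION & SPEC =====
def Spec_solution (S : String) (out : List (List (List String))) : Prop := out = solution_alt S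
instance (S : String) (out : List (List (List String))) : Decidable (Spec_solution S out) := by unfold Spec_solution; infer_instance

-- ===== CLAIM (what is proved, stated in full; the proofs are below) =====
def Claim_equal_solution : Prop := ∀ (S : String), Dom_solution S → Spec_solution S (solution S)

-- ===== LEMMAS AND PROOFS =====

-- all label strings of {0,1,2}^m in lexicographic order
def allStrs : Nat → List (List Nat)
  | 0 => [[]]
  | m+1 => [0, 1, 2].flatMap (fun d => (allStrs m).map (d :: ·))

-- A's acceptance of a label string from a state with g groups (mirrors genA's guards)
def okA : Nat → List Nat → Bool
  | _, [] => true
  | g, d :: ds =>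
      if d < g then decide ((3 : Int) - g < (ds.length : Int) + 1) && okA g ds
      else if d = g ∧ g < 3 then okA (g+1) ds else false

-- restricted-growth validity (no pruning condition)
def okRGS : Nat → List Nat → Bool
  | _, [] => true
  | g, d :: ds => if d < g then okRGS g ds else if d = g ∧ g < 3 then okRGS (g+1) ds else false

-- final number of groups after consuming the labels
def blocks : Nat → List Nat → Nat
  | g, [] => g
  | g, d :: ds => if d < g then blocks g ds else blocks (g+1) ds

-- building the groups the way A grows them
def buildA : List (List String) → List String → List Nat → List (List String)
  | groups, _, [] => groups
  | groups, [], _ :: _ => groups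
  | groups, c :: cs, d :: ds =>
      if d < groups.length then buildA (groups.modify d (· ++ [c])) cs ds
      else buildA (groups ++ [[c]]) cs ds

theorem modify_append_left {α : Type} (l l' : List α) (f : α → α) (i : Nat) (h : i < l.length) :
    (l ++ l').modify i f = l.modify i f ++ l' := by
  induction l generalizing i with
  | nil => simp at h
  | cons x t ih =>
    cases i with
    | zero => simp [List.modify]
    | succ j =>
      simp only [List.cons_append, List.modify_succ_cons]
      rw [ih j (by simpa using h)]

theorem modify_append_length {α : Type} (l t : List α) (f : α → α) (x : α) :
    (l ++ x :: t).modify l.length f = l ++ f x :: t := by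
  induction l with
  | nil => simp [List.modify]
  | cons y s ih => simpa [List.modify_succ_cons] using ih

theorem mem_allStrs {m : Nat} {ds : List Nat} (h : ds ∈ allStrs m) :
    ds.length = m ∧ ∀ d ∈ ds, d < 3 := by
  induction m generalizing ds with
  | zero => simp [allStrs] at h; simp [h]
  | succ m ih =>
    simp only [allStrs, List.mem_flatMap, List.mem_map] at h
    obtain ⟨d, hd, t, ht, rfl⟩ := h
    obtain ⟨hl, hall⟩ := ih ht
    refine ⟨by simp [hl], ?_⟩
    intro e he
    rcases List.mem_cons.1 he with rfl | he
    · fin_cases hd <;> omega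
    · exact hall e he

theorem blocks_le (ds : List Nat) (g : Nat) : blocks g ds ≤ g + ds.length := by
  induction ds generalizing g with
  | nil => simp [blocks]
  | cons d t ih =>
    simp only [blocks]
    split
    · have := ih g; simp; omega
    · have := ih (g+1); simp; omega

theorem blocks_ge (ds : List Nat) (g : Nat) : g ≤ blocks g ds := by
  induction ds generalizing g with
  | nil => simp [blocks]
  | cons d t ih =>
    simp only [blocks]
    split
    · exact ih g
    · exact le_trans (by omega) (ih (g+1))

theorem okA_eq (ds : List Nat) (g : Nat) (hg : g ≤ 3) :
    okA g ds = (okRGS g ds && decide (blocks g ds = min 3 (g + ds.length))) := by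
  induction ds generalizing g with
  | nil =>
    simp only [okA, okRGS, blocks, List.length_nil, Nat.add_zero, Bool.true_and]
    have : min 3 g = g := Nat.min_eq_right hg
    simp [this]
  | cons d t ih =>
    simp only [okA, okRGS, blocks, List.length_cons]
    by_cases h1 : d < g
    · simp only [if_pos h1]
      rw [ih g hg]
      by_cases hp : (3 : Int) - g < (t.length : Int) + 1
      · have hmin : min 3 (g + t.length) = min 3 (g + (t.length + 1)) := by omega
        simp [hp, hmin]
      · have hb := blocks_le t g
        have : blocks g t ≠ min 3 (g + (t.length + 1)) := by omega
        simp [hp, this]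
    · simp only [if_neg h1]
      by_cases h2 : d = g ∧ g < 3
      · simp only [if_pos h2]
        rw [ih (g+1) (by omega)]
        have : g + (t.length + 1) = (g + 1) + t.length := by omega
        rw [this]
      · simp [h2]
theorem okLoopB_eq (ds : List Nat) (g : Nat) (hg : g ≤ 3) (hd : ∀ d ∈ ds, d < 3) :
    (okLoopB ds ((g : Int) - 1)).1 = okRGS g ds ∧
      ((okLoopB ds ((g : Int) - 1)).1 = true →
        (okLoopB ds ((g : Int) - 1)).2 = (blocks g ds : Int) - 1) := by
  induction ds generalizing g with
  | nil => simp [okLoopB, okRGS, blocks]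
  | cons d t ih =>
    have hd3 : d < 3 := hd d (List.mem_cons_self ..)
    have ht : ∀ e ∈ t, e < 3 := fun e he => hd e (List.mem_cons_of_mem _ he)
    simp only [okLoopB, okRGS, blocks]
    by_cases h1 : d < g
    · have hc : ¬ ((d : Int) > (g : Int) - 1 + 1) := by omega
      have hm : ¬ ((d : Int) > (g : Int) - 1) := by omega
      simp only [if_neg hc, if_neg hm, if_pos h1]
      exact ih g hg ht
    · by_cases h2 : d = g
      · subst h2
        have hc : ¬ ((d : Int) > (d : Int) - 1 + 1) := by omega
        have hm : (d : Int) > (d : Int) - 1 := by omega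
        have h3 : d = d ∧ d < 3 := ⟨rfl, hd3⟩
        simp only [if_neg hc, if_pos hm, if_neg h1]
        have hcast : (d : Int) = ((d : Nat) + 1 : Nat) - 1 := by omega
        rw [hcast]
        simpa [hd3] using ih (d+1) (by omega) ht
      · have hc : (d : Int) > (g : Int) - 1 + 1 := by
          have : g < d := by omega
          omega
        have h3 : ¬ (d = g ∧ g < 3) := by tauto
        have hgd : g < d := by omega
        simp only [if_pos hc, if_neg h1, if_neg h3]
        simp
theorem buildA_eq (ds : List Nat) (groups : List (List String)) (rest : List String)
    (hlen : rest.length = ds.length) (hok : okRGS groups.length ds = true) :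
    buildA groups rest ds =
      (rest.zip ds).foldl (fun gs p => gs.modify p.2 (· ++ [p.1]))
        (groups ++ List.replicate (blocks groups.length ds - groups.length) []) := by
  induction ds generalizing groups rest with
  | nil => simp [buildA, blocks]
  | cons d t ih =>
    cases rest with
    | nil => simp at hlen
    | cons c rest =>
      simp only [okRGS] at hok
      simp only [buildA, blocks, List.zip_cons_cons, List.foldl_cons]
      by_cases h1 : d < groups.length
      · simp only [if_pos h1] at hok ⊢
        rw [ih (groups.modify d (· ++ [c])) rest (by simpa using hlen)
              (by simpa using hok)]
        congr 1
        rw [modify_append_left _ _ _ _ h1]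
        simp
      · simp only [if_neg h1] at hok ⊢
        have h2 : d = groups.length ∧ groups.length < 3 := by
          by_contra hcon
          simp [if_neg hcon] at hok
        simp only [if_pos h2] at hok
        obtain ⟨rfl, hg3⟩ := h2
        have hB := blocks_ge t (groups.length + 1)
        have hrep : List.replicate (blocks (groups.length + 1) t - groups.length) ([] : List String)
            = [] :: List.replicate (blocks (groups.length + 1) t - (groups.length + 1)) [] := by
          rw [← List.replicate_succ]
          congr 1
          omega
        rw [hrep, modify_append_length]
        rw [ih (groups ++ [[c]]) rest (by simpa using hlen) (by simpa using hok)]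
        congr 1
        simp
theorem genA_eq (cs : List String) (m i : Nat) (groups : List (List String))
    (hn : i + m = cs.length) (hg : groups.length ≤ 3) :
    genA cs m i groups = (allStrs m).filterMap (fun ds =>
      if okA groups.length ds then some (buildA groups ((cs.drop i).take m) ds) else none) := by
  induction m generalizing i groups with
  | zero => simp [genA, allStrs, okA, buildA]
  | succ m ih =>
    have hi : i < cs.length := by omega
    have hdt : (cs.drop i).take (m+1) = cs.getD i "" :: ((cs.drop (i+1)).take m) := by
      rw [List.drop_eq_getElem_cons hi, List.take_succ_cons]
      congr 1
      exact (List.getD_eq_getElem cs "" hi).symm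
    have hT : ∀ d : Nat, d < 3 →
        (allStrs m).filterMap (fun ds =>
          if okA groups.length (d :: ds) then
            some (buildA groups ((cs.drop i).take (m+1)) (d :: ds)) else none)
        = (if d < groups.length then
             (if (3 : Int) - groups.length < (m : Int) + 1 then
                genA cs m (i+1) (groups.modify d (· ++ [cs.getD i ""])) else [])
           else if d = groups.length ∧ groups.length < 3 then
             genA cs m (i+1) (groups ++ [[cs.getD i ""]]) else []) := by
      intro d hd3
      by_cases h1 : d < groups.length
      · simp only [if_pos h1]
        by_cases hp : (3 : Int) - groups.length < (m : Int) + 1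
        · simp only [if_pos hp]
          rw [ih (i+1) (groups.modify d (· ++ [cs.getD i ""])) (by omega)
                (by simpa using hg)]
          apply List.filterMap_congr
          intro ds hds
          have hlds := (mem_allStrs hds).1
          have hok : okA groups.length (d :: ds) = okA groups.length ds := by
            simp [okA, h1, hlds, hp]
          have hbd : buildA groups ((cs.drop i).take (m+1)) (d :: ds)
              = buildA (groups.modify d (· ++ [cs.getD i ""])) ((cs.drop (i+1)).take m) ds := by
            rw [hdt]; simp [buildA, h1]
          rw [hok, hbd]
          simp
        · simp only [if_neg hp]
          apply List.filterMap_eq_nil_iff.2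
          intro ds hds
          have hlds := (mem_allStrs hds).1
          simp [okA, h1, hlds, hp]
      · simp only [if_neg h1]
        by_cases h2 : d = groups.length ∧ groups.length < 3
        · simp only [if_pos h2]
          rw [ih (i+1) (groups ++ [[cs.getD i ""]]) (by omega) (by simp; omega)]
          apply List.filterMap_congr
          intro ds hds
          have hok : okA groups.length (d :: ds) = okA (groups.length + 1) ds := by
            simp [okA, h2]
          have hbd : buildA groups ((cs.drop i).take (m+1)) (d :: ds)
              = buildA (groups ++ [[cs.getD i ""]]) ((cs.drop (i+1)).take m) ds := by
            rw [hdt]; simp [buildA, h1]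
          rw [hok, hbd]
          simp
        · simp only [if_neg h2]
          apply List.filterMap_eq_nil_iff.2
          intro ds hds
          simp [okA, h1, h2]
    obtain ⟨g, hgdef⟩ : ∃ g, groups.length = g := ⟨_, rfl⟩
    have hg' : g ≤ 3 := hgdef ▸ hg
    simp only [allStrs, List.flatMap_cons, List.flatMap_nil, List.append_nil,
      List.filterMap_append, List.filterMap_map, Function.comp_def]
    rw [hT 0 (by omega), hT 1 (by omega), hT 2 (by omega)]
    simp only [genA, hgdef]
    interval_cases g
    · by_cases hp : (3 : Int) - (0 : Nat) < (m : Int) + 1 <;> simp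
    · by_cases hp : (3 : Int) - (1 : Nat) < (m : Int) + 1 <;> simp [List.range_succ]
    · by_cases hp : (3 : Int) - (2 : Nat) < (m : Int) + 1 <;> simp [List.range_succ] <;>
        (try (by_cases hm : 0 < m <;> simp [hm]))
    · by_cases hp : (3 : Int) - (3 : Nat) < (m : Int) + 1
      · simp [List.range_succ]
      · simp
        omega
theorem lsbB_split (n d r : Nat) (hr : r < 3 ^ n) (hd : d < 3) :
    lsbB (n+1) (d * 3 ^ n + r) = lsbB n r ++ [d] := by
  induction n generalizing r with
  | zero =>
    interval_cases r
    simp [lsbB, Nat.mod_eq_of_lt hd]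
  | succ n ih =>
    have h1 : (d * 3 ^ (n+1) + r) % 3 = r % 3 := by
      have : d * 3 ^ (n+1) + r = r + (d * 3 ^ n) * 3 := by ring
      rw [this, Nat.add_mul_mod_self_right]
    have h2 : (d * 3 ^ (n+1) + r) / 3 = d * 3 ^ n + r / 3 := by
      have : d * 3 ^ (n+1) + r = r + (d * 3 ^ n) * 3 := by ring
      rw [this, Nat.add_mul_div_right _ _ (by omega)]
      omega
    have h3 : r / 3 < 3 ^ n := by
      have : 3 ^ (n+1) = 3 ^ n * 3 := by ring
      rw [this] at hr
      exact Nat.div_lt_of_lt_mul (by omega)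
    show (d * 3 ^ (n+1) + r) % 3 :: lsbB (n+1) ((d * 3 ^ (n+1) + r) / 3) = _
    rw [h1, h2, ih (r/3) h3]
    rfl

theorem map_digitsB (n : Nat) : (List.range (3 ^ n)).map (digitsB n) = allStrs n := by
  induction n with
  | zero => simp [digitsB, lsbB, allStrs]
  | succ n ih =>
    have hsplit : (3 : Nat) ^ (n+1) = 3 ^ n + (3 ^ n + 3 ^ n) := by ring
    have hdig : ∀ (d r : Nat), r < 3 ^ n → d < 3 →
        digitsB (n+1) (d * 3 ^ n + r) = d :: digitsB n r := by
      intro d r hr hd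
      unfold digitsB
      rw [lsbB_split n d r hr hd]
      simp
    rw [hsplit, List.range_add, List.range_add]
    simp only [List.map_append, List.map_map]
    have e0 : (List.range (3 ^ n)).map (digitsB (n+1)) = (allStrs n).map (0 :: ·) := by
      rw [← ih]
      simp only [List.map_map]
      apply List.map_congr_left
      intro r hr
      have := hdig 0 r (List.mem_range.1 hr) (by omega)
      simpa using this
    have e1 : (List.range (3 ^ n)).map (digitsB (n+1) ∘ (fun k => 3 ^ n + k))
        = (allStrs n).map (1 :: ·) := by
      rw [← ih]
      simp only [List.map_map]
      apply List.map_congr_left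
      intro r hr
      have := hdig 1 r (List.mem_range.1 hr) (by omega)
      simp only [Function.comp_apply]
      rw [show 3 ^ n + r = 1 * 3 ^ n + r by ring, this]
    have e2 : (List.range (3 ^ n)).map (digitsB (n+1) ∘ (fun k => 3 ^ n + k) ∘ fun k => 3 ^ n + k)
        = (allStrs n).map (2 :: ·) := by
      rw [← ih]
      simp only [List.map_map]
      apply List.map_congr_left
      intro r hr
      have := hdig 2 r (List.mem_range.1 hr) (by omega)
      simp only [Function.comp_apply]
      rw [show 3 ^ n + (3 ^ n + r) = 2 * 3 ^ n + r by ring, this]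
    rw [e0, e1, e2]
    simp [allStrs]
theorem filter_map_eq_filterMap {α β : Type} (l : List α) (p : α → Bool) (f : α → β) :
    (l.filter p).map f = l.filterMap (fun x => if p x then some (f x) else none) := by
  induction l with
  | nil => rfl
  | cons x t ih =>
    by_cases h : p x <;> simp [h, ih]

theorem filterMap_precomp {α β γ : Type} (p : β → Bool) (v : β → γ) (g : α → β) (l : List α) :
    (l.filterMap fun x => if p (g x) then some (v (g x)) else none)
      = (l.map g).filterMap (fun y => if p y then some (v y) else none) := by
  rw [List.filterMap_map]; rfl

theorem core_pointwise {γ : Type} (cs : List String) (ds : List Nat) (F : List (List String) → γ)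
    (hlen : ds.length = cs.length) (hd3 : ∀ d ∈ ds, d < 3) :
    Option.map F (if okA 0 ds then some (buildA [] cs ds) else none)
      = if (okLoopB ds (-1)).1 && ((okLoopB ds (-1)).2 + 1 == ((min 3 cs.length : Nat) : Int)) then
          some (F ((cs.zip ds).foldl (fun gs p => gs.modify p.2 (· ++ [p.1]))
            (List.replicate (min 3 cs.length) [])))
        else none := by
  have hb := okLoopB_eq ds 0 (by omega) hd3
  have hcast : ((0 : Nat) : Int) - 1 = -1 := by norm_num
  rw [hcast] at hb
  rw [okA_eq ds 0 (by omega)]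
  simp only [Nat.zero_add]
  rw [hlen]
  cases hok : okRGS 0 ds
  · rw [hok] at hb
    simp [hb.1]
  · rw [hok] at hb
    have h2 := hb.2 hb.1
    by_cases hbl : blocks 0 ds = min 3 cs.length
    · have hbuild := buildA_eq ds [] cs (hlen.symm ▸ rfl) (by simpa using hok)
      simp only [List.length_nil, List.nil_append, Nat.sub_zero] at hbuild
      rw [hbl] at hbuild
      simp [hb.1, hbl, hbuild]
      rw [h2]
      omega
    · simp [hb.1, hbl]
      rw [h2]
      omega

theorem solution_eq (S : String) : solution S = solution_alt S := by
  simp only [solution, solution_alt]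
  rw [PySem.List.foldl_append_if
        (fun code => (okLoopB (digitsB (S.toList.map (fun c => String.ofList [c])).length code) (-1)).1 &&
          ((okLoopB (digitsB (S.toList.map (fun c => String.ofList [c])).length code) (-1)).2 + 1 ==
            ((min 3 (S.toList.map (fun c => String.ofList [c])).length : Nat) : Int)))]
  rw [List.nil_append, filter_map_eq_filterMap]
  rw [filterMap_precomp
        (fun ds => (okLoopB ds (-1)).1 && ((okLoopB ds (-1)).2 + 1 ==
            ((min 3 (S.toList.map (fun c => String.ofList [c])).length : Nat) : Int)))
        (fun ds => PySem.List.sorted2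
          (((S.toList.map (fun c => String.ofList [c])).zip ds).foldl
            (fun gs p => gs.modify p.2 (· ++ [p.1]))
            (List.replicate (min 3 (S.toList.map (fun c => String.ofList [c])).length) ([] : List String)))
          (fun p => (p.length : Int)) (fun p => p) false)
        (digitsB (S.toList.map (fun c => String.ofList [c])).length)]
  rw [map_digitsB]
  rw [genA_eq (S.toList.map (fun c => String.ofList [c])) (S.toList.map (fun c => String.ofList [c])).length 0 []
        (by simp) (by simp)]
  rw [List.map_filterMap]
  apply List.filterMap_congr
  intro ds hds
  obtain ⟨hlen, hd3⟩ := mem_allStrs hds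
  simp only [List.drop_zero, List.take_length, List.length_nil]
  exact core_pointwise (S.toList.map (fun c => String.ofList [c])) ds _ hlen hd3

-- ===== VERDICT (by name: the statement is the Claim_ definition above) =====
theorem solution_spec : Claim_equal_solution := by
  intro S _
  unfold Spec_solution
  exact solution_eq S
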